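-- pv_equiv track=rewrite | github.com/msmeeseeks/recidiviz-data | recidiviz/ingest/aggregate/regions/tn/tn_female_aggregate_ingest.py | _pretend_facility_is_county
-- ===== SOURCE A (Python) =====
-- _MANUAL_FACILITY_TO_COUNTY_MAP = {
--     'Johnson City (F)': 'Washington',
--     'Kingsport City': 'Sullivan',
-- }
--
-- def _pretend_facility_is_county(facility_name: str) -> str:
--     """Format facility_name like a county_name to match each to a fips."""
--     if facility_name in _MANUAL_FACILITY_TO_COUNTY_MAP:
--         return _MANUAL_FACILITY_TO_COUNTY_MAP[facility_name]
--
--     words_after_county_name = [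
--         '-',
--         'Annex',
--         'Co. Det. Center',
--         'Det. Center',
--         'Det, Center',
--         'Extension',
--         'Jail',
--         'SCCC',
--         'Work Center',
--         'Workhouse',
--     ]
--     for delimiter in words_after_county_name:
--         facility_name = facility_name.split(delimiter)[0]
--
--     return facility_name
-- ===== SOURCE B (Python) =====
-- _MANUAL_FACILITY_TO_COUNTY_MAP = {
--     'Johnson City (F)': 'Washington',
--     'Kingsport City': 'Sullivan',
-- }
--
-- _WORDS_AFTER_COUNTY_NAME = [
--     '-',
--     'Annex',
--     'Co. Det. Center',
--     'Det. Center',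
--     'Det, Center',
--     'Extension',
--     'Jail',
--     'SCCC',
--     'Work Center',
--     'Workhouse',
-- ]
--
-- def _pretend_facility_is_county(facility_name: str) -> str:
--     """Format facility_name like a county_name to match each to a fips."""
--     if facility_name in _MANUAL_FACILITY_TO_COUNTY_MAP:
--         return _MANUAL_FACILITY_TO_COUNTY_MAP[facility_name]
--
--     # Single left-to-right scan: cut at the earliest position where any
--     # facility-type word begins, keeping everything before it.
--     for i in range(len(facility_name)):
--         for word in _WORDS_AFTER_COUNTY_NAME:
--             if facility_name.startswith(word, i):
--                 return facility_name[:i]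
--     return facility_name
-- ===== Notes on version B (the rewrite author's own statement) =====
-- stated objective: alternative
-- what changed: B replaces A's delimiter-major loop of ten split-and-rebuild passes with a single position-major left-to-right scan that returns the prefix before the earliest occurrence of any facility-type word.
-- intended difference: On strings whose earliest delimiter occurrence is 'SCCC' immediately followed by 'Co. Det. Center', A returns the prefix plus a spurious 'SCC' (its earlier 'Co. Det. Center' pass cuts inside the 'SCCC' match), while B cuts at the true earliest delimiter and returns the bare prefix, which is the intended county name. — e.g. on _pretend_facility_is_county("SCCCo. Det. Center"): A returns "SCC", B returns ""
import Mathlib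
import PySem

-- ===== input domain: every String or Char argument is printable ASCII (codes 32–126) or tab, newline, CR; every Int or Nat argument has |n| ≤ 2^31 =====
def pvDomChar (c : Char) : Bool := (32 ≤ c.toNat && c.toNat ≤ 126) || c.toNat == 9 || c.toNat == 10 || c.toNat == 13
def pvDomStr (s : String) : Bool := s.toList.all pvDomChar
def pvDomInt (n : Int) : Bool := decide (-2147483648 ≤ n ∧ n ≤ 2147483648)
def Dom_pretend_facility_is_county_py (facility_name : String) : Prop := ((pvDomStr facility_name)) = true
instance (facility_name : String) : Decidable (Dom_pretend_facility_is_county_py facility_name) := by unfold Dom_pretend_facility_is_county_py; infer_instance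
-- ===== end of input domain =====

-- B replaces A's delimiter-major loop of ten split-and-rebuild passes by a single position-major
-- left-to-right scan that cuts at the earliest occurrence of any facility-type word; on the rare
-- overlap corner described at D_ below the two differ, and B's value is the intended one.

-- shared data tables (the module-level dict and delimiter list of the Python source)
def tnMap : PySem.Dict String String :=
  ⟨[("Johnson City (F)", "Washington"), ("Kingsport City", "Sullivan")]⟩

def tnDelims : List String :=
  ["-", "Annex", "Co. Det. Center", "Det. Center", "Det, Center",
   "Extension", "Jail", "SCCC", "Work Center", "Workhouse"]

def delimsC : List (List Char) := tnDelims.map String.toList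

-- ===== PORT A =====
-- for each delimiter: facility_name = facility_name.split(delimiter)[0]
-- (split? is some for every delimiter here — all are nonempty — and Python's split never
--  returns an empty list, so the [0] never raises; the getD []/headI defaults are never used)
def pretend_facility_is_county_py (facility_name : String) : String :=
  if PySem.Dict.contains tnMap facility_name then
    (PySem.Dict.get? tnMap facility_name).getD ""
  else
    tnDelims.foldl (fun name delimiter => ((PySem.Str.split? name delimiter).getD []).headI)
      facility_name

-- ===== PORT B =====
-- for i in range(len(s)): for word in WORDS: if s.startswith(word, i): return s[:i]
-- return s
-- (startswith(word, i) with 0 ≤ i ≤ len(s) is exactly 'word is a prefix of the suffix at i',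
--  so the index loop is ported as structural recursion on that suffix; the final 'return s'
--  is the i = len(s) slice, the same value)
def bScan : List Char → Nat
  | [] => 0
  | c :: rest =>
      if delimsC.any (fun word => PySem.Chars.startswith (c :: rest) word) then 0
      else bScan rest + 1

def pretend_facility_is_county_py_alt (facility_name : String) : String :=
  if PySem.Dict.contains tnMap facility_name then
    (PySem.Dict.get? tnMap facility_name).getD ""
  else
    PySem.Str.slice facility_name none (some ((bScan facility_name.toList : Nat) : Int))

-- ===== PRECONDITION & SPEC =====
def patC : List Char := "SCCCo. Det. Center".toList

-- On strings whose earliest delimiter occurrence is 'SCCC' immediately followed by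
-- 'Co. Det. Center' (i.e. the pattern occurs and no delimiter occurs strictly before its
-- first occurrence), A returns the prefix plus a spurious 'SCC' (its earlier
-- 'Co. Det. Center' pass cuts inside the 'SCCC' match), while B cuts at the true earliest
-- delimiter and returns the bare prefix, which is the intended county name.
def D_pretend_facility_is_county_py (facility_name : String) : Prop :=
  0 ≤ PySem.Chars.find facility_name.toList patC ∧
  ∀ d ∈ delimsC, PySem.Chars.find facility_name.toList d = -1 ∨
    PySem.Chars.find facility_name.toList patC ≤ PySem.Chars.find facility_name.toList d

instance (facility_name : String) : Decidable (D_pretend_facility_is_county_py facility_name) := by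
  unfold D_pretend_facility_is_county_py; infer_instance

def Spec_pretend_facility_is_county_py (facility_name : String) (out : String) : Prop :=
  ¬ D_pretend_facility_is_county_py facility_name → out = pretend_facility_is_county_py_alt facility_name
instance (facility_name : String) (out : String) : Decidable (Spec_pretend_facility_is_county_py facility_name out) := by
  unfold Spec_pretend_facility_is_county_py; infer_instance

def pvDiffWitness_pretend_facility_is_county_py : String := "SCCCo. Det. Center"
def pvDiffWitnessOut_pretend_facility_is_county_py : String × String := ("SCC", "")

-- ===== CLAIM (what is proved, stated in full; the proofs are below) =====
def Claim_unchanged_pretend_facility_is_county_py : Prop :=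
  ∀ (facility_name : String), Dom_pretend_facility_is_county_py facility_name →
    Spec_pretend_facility_is_county_py facility_name (pretend_facility_is_county_py facility_name)
def Claim_changed_pretend_facility_is_county_py : Prop :=
  Dom_pretend_facility_is_county_py (pvDiffWitness_pretend_facility_is_county_py) ∧
  D_pretend_facility_is_county_py (pvDiffWitness_pretend_facility_is_county_py) ∧
  pretend_facility_is_county_py (pvDiffWitness_pretend_facility_is_county_py) = pvDiffWitnessOut_pretend_facility_is_county_py.1 ∧
  pretend_facility_is_county_py_alt (pvDiffWitness_pretend_facility_is_county_py) = pvDiffWitnessOut_pretend_facility_is_county_py.2 ∧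
  pvDiffWitnessOut_pretend_facility_is_county_py.1 ≠ pvDiffWitnessOut_pretend_facility_is_county_py.2
def Claim_exact_pretend_facility_is_county_py : Prop :=
  ∀ (facility_name : String), Dom_pretend_facility_is_county_py facility_name →
    D_pretend_facility_is_county_py facility_name →
    pretend_facility_is_county_py facility_name ≠ pretend_facility_is_county_py_alt facility_name

-- ===== LEMMAS AND PROOFS =====

def hitAt (s : List Char) (j : Nat) : Bool := delimsC.any (fun d => d.isPrefixOf (s.drop j))

-- the cut a delimiter d induces on s: its first occurrence, or len(s) when absent
def posIn (s d : List Char) : Nat :=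
  if PySem.Chars.find s d = -1 then s.length else (PySem.Chars.find s d).toNat

-- A's per-delimiter step (split(d)[0]) on the Chars level
def stepC (t d : List Char) : List Char := ((PySem.Chars.split? t d).getD []).headI

-- the same step as an index update (Int level, as findFrom computes it)
def stepI (s : List Char) (cut : Int) (d : List Char) : Int :=
  if PySem.Chars.findFrom s d 0 (some cut) ≠ -1
  then PySem.Chars.findFrom s d 0 (some cut) else cut

-- and on the Nat level
def stepN (s : List Char) (cut : Nat) (d : List Char) : Nat :=
  if PySem.Chars.find (s.take cut) d = -1 then cut else (PySem.Chars.find (s.take cut) d).toNat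

theorem find_go_shift (sep : List Char) (hsep : sep ≠ []) :
    ∀ (t : List Char) (k : Nat), PySem.Chars.find.go sep t k =
      if PySem.Chars.find t sep = -1 then -1 else PySem.Chars.find t sep + k := by
  intro t
  induction t with
  | nil =>
    intro k
    simp [PySem.Chars.find, PySem.Chars.find.go.eq_1, List.isEmpty_iff, hsep]
  | cons c rest ih =>
    intro k
    rw [PySem.Chars.find.go.eq_2]
    by_cases hp : sep.isPrefixOf (c :: rest) = true
    · simp [PySem.Chars.find, PySem.Chars.find.go.eq_2, hp]
    · simp only [hp]
      rw [ih (k + 1)]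
      have h0 : PySem.Chars.find (c :: rest) sep = PySem.Chars.find.go sep (c :: rest) 0 := rfl
      rw [h0, PySem.Chars.find.go.eq_2]
      simp only [hp]
      rw [ih 1]
      have hge := PySem.Chars.neg_one_le_find rest sep
      by_cases hf : PySem.Chars.find rest sep = -1
      · simp [hf]
      · simp only [hf, if_false]
        split_ifs <;> push_cast <;> omega

theorem go_head_acc (sep : List Char) :
    ∀ (fuel : Nat) (l cur acc : List Char) (accs : List (List Char)),
      (PySem.Chars.splitOn.go sep fuel l cur (acc :: accs)).head? = (acc :: accs).getLast? := by
  intro fuel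
  induction fuel with
  | zero =>
    intro l cur acc accs
    rw [PySem.Chars.splitOn.go.eq_def]
    simp [List.getLast?_cons]
  | succ fuel ih =>
    intro l cur acc accs
    rw [PySem.Chars.splitOn.go.eq_def]
    cases l with
    | nil => simp [List.getLast?_cons]
    | cons c rest =>
      by_cases hp : sep.isPrefixOf (c :: rest) = true
      · simp only [hp, if_true]
        rw [ih]
        simp [List.getLast?_cons_cons]
      · simp only [hp, Bool.false_eq_true, if_false]
        exact ih rest (c :: cur) acc accs

theorem go_head_nil (sep : List Char) (hsep : sep ≠ []) :
    ∀ (fuel : Nat) (l cur : List Char), l.length < fuel →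
      (PySem.Chars.splitOn.go sep fuel l cur []).head? =
        some (cur.reverse ++ l.take (posIn l sep)) := by
  intro fuel
  induction fuel with
  | zero => intro l cur h; omega
  | succ fuel ih =>
    intro l cur h
    rw [PySem.Chars.splitOn.go.eq_def]
    cases l with
    | nil =>
      have hf : PySem.Chars.find [] sep = -1 := by
        simp [PySem.Chars.find, PySem.Chars.find.go.eq_1, List.isEmpty_iff, hsep]
      simp [posIn, hf]
    | cons c rest =>
      by_cases hp : sep.isPrefixOf (c :: rest) = true
      · simp only [hp, if_true]
        rw [go_head_acc]
        have hf : PySem.Chars.find (c :: rest) sep = 0 := by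
          simp [PySem.Chars.find, PySem.Chars.find.go.eq_2, hp]
        simp [posIn, hf]
      · simp only [hp, Bool.false_eq_true, if_false]
        rw [ih rest (c :: cur) (by simp at h ⊢; omega)]
        have hge := PySem.Chars.neg_one_le_find rest sep
        have hle := PySem.Chars.find_le_length rest sep
        have hf : PySem.Chars.find (c :: rest) sep =
            if PySem.Chars.find rest sep = -1 then -1 else PySem.Chars.find rest sep + 1 := by
          have h0 : PySem.Chars.find (c :: rest) sep = PySem.Chars.find.go sep (c :: rest) 0 := rfl
          rw [h0, PySem.Chars.find.go.eq_2, if_neg hp]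
          rw [find_go_shift sep hsep]
          split_ifs with hh
          · rfl
          · push_cast; ring
        have hpos : posIn (c :: rest) sep = posIn rest sep + 1 := by
          by_cases hm : PySem.Chars.find rest sep = -1
          · simp [posIn, hf, hm]
          · have hne1 : PySem.Chars.find rest sep + 1 ≠ -1 := by omega
            simp only [posIn, hf, hm, if_false, hne1]
            omega
        rw [hpos]
        simp [List.take_succ_cons]

theorem stepC_eq (t d : List Char) (hd : d ≠ []) : stepC t d = t.take (posIn t d) := by
  unfold stepC
  rw [PySem.Chars.split?]
  simp only [List.isEmpty_iff, hd, if_false]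
  have h := go_head_nil d hd (t.length + 1) t [] (by omega)
  rw [PySem.Chars.splitOn]
  cases hgo : PySem.Chars.splitOn.go d (t.length + 1) t [] [] with
  | nil => rw [hgo] at h; simp at h
  | cons x xs =>
    rw [hgo] at h
    simp at h
    simp [List.headI, h]

-- Python's name.find(d, 0, cut) is exactly "first occurrence inside the prefix name[:cut]"
theorem findFrom_prefix (s sub : List Char) (c : Nat) (hc : c ≤ s.length) :
    PySem.Chars.findFrom s sub 0 (some (c : Int)) = PySem.Chars.find (s.take c) sub := by
  have hge := PySem.Chars.neg_one_le_find (s.take c) sub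
  unfold PySem.Chars.findFrom
  simp only []
  split_ifs <;> push_cast <;> try omega
  all_goals simp_all

-- the loop invariant: A's shrinking string is always the prefix of s at the cut index
theorem fold_idx (s : List Char) :
    ∀ (ds : List (List Char)) (c : Nat), (∀ d ∈ ds, d ≠ []) → c ≤ s.length →
      ds.foldl stepC (s.take c) = s.take ((ds.foldl (stepI s) (c : Int)).toNat) := by
  intro ds
  induction ds with
  | nil => intro c _ _; simp
  | cons d ds ih =>
    intro c hne hc
    have hd : d ≠ [] := hne d (by simp)
    have hge := PySem.Chars.neg_one_le_find (s.take c) d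
    have hle := PySem.Chars.find_le_length (s.take c) d
    have hlt : (s.take c).length = c := by simp [List.length_take]; omega
    simp only [List.foldl_cons]
    rw [stepC_eq _ _ hd]
    have hff : stepI s (c : Int) d =
        if PySem.Chars.find (s.take c) d ≠ -1 then PySem.Chars.find (s.take c) d else (c : Int) := by
      unfold stepI
      rw [findFrom_prefix s d c hc]
    by_cases hf : PySem.Chars.find (s.take c) d = -1
    · have h1 : posIn (s.take c) d = (s.take c).length := by unfold posIn; rw [if_pos hf]
      rw [h1, List.take_length, hff, if_neg (by simp [hf])]
      exact ih c (fun d' hd' => hne d' (by simp [hd'])) hc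
    · have h0 : 0 ≤ PySem.Chars.find (s.take c) d := by omega
      have h1 : posIn (s.take c) d = (PySem.Chars.find (s.take c) d).toNat := by
        unfold posIn; rw [if_neg hf]
      rw [h1, List.take_take, hff, if_pos (by simp [hf])]
      have h2 : min (PySem.Chars.find (s.take c) d).toNat c = (PySem.Chars.find (s.take c) d).toNat := by
        omega
      rw [h2]
      have h3 : PySem.Chars.find (s.take c) d = (((PySem.Chars.find (s.take c) d).toNat : Nat) : Int) := by
        omega
      rw [h3]
      exact ih (PySem.Chars.find (s.take c) d).toNat
        (fun d' hd' => hne d' (by simp [hd'])) (by omega)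

-- the Int fold is the Nat fold
theorem foldI_foldN (s : List Char) :
    ∀ (ds : List (List Char)) (c : Nat), c ≤ s.length →
      ds.foldl (stepI s) (c : Int) = ((ds.foldl (stepN s) c : Nat) : Int) ∧
        ds.foldl (stepN s) c ≤ c := by
  intro ds
  induction ds with
  | nil => intro c _; exact ⟨rfl, le_refl c⟩
  | cons d ds ih =>
    intro c hc
    have hge := PySem.Chars.neg_one_le_find (s.take c) d
    have hle := PySem.Chars.find_le_length (s.take c) d
    have hlt : ((s.take c).length : Int) = (c : Int) := by simp [List.length_take]; omega
    simp only [List.foldl_cons]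
    have hff : stepI s (c : Int) d =
        if PySem.Chars.find (s.take c) d ≠ -1 then PySem.Chars.find (s.take c) d else (c : Int) := by
      unfold stepI
      rw [findFrom_prefix s d c hc]
    by_cases hf : PySem.Chars.find (s.take c) d = -1
    · rw [hff, if_neg (by simp [hf]), show stepN s c d = c by unfold stepN; rw [if_pos hf]]
      exact ih c hc
    · have hsN : stepN s c d = (PySem.Chars.find (s.take c) d).toNat := by
        unfold stepN; rw [if_neg hf]
      have hcast : PySem.Chars.find (s.take c) d = ((stepN s c d : Nat) : Int) := by
        rw [hsN]; omega
      rw [hff, if_pos (by simp [hf]), hcast]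
      have h1 : stepN s c d ≤ c := by rw [hsN]; omega
      obtain ⟨he, hb⟩ := ih (stepN s c d) (le_trans h1 hc)
      exact ⟨he, le_trans hb h1⟩

-- bridge A's String-level fold to the Chars level
theorem step_toList (t d : String) (hd : d.toList ≠ []) :
    (((PySem.Str.split? t d).getD []).headI).toList = stepC t.toList d.toList := by
  unfold stepC
  have hb := PySem.Str.split?_map t d
  rw [PySem.Chars.split?] at *
  simp only [List.isEmpty_iff, hd, if_false] at *
  cases hs : PySem.Str.split? t d with
  | none => rw [hs] at hb; simp at hb
  | some l =>
    rw [hs] at hb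
    simp only [Option.map_some, Option.some.injEq] at hb
    rw [← hb]
    simp only [Option.getD_some]
    cases l with
    | nil =>
      simp [List.headI]
      rfl
    | cons x xs => simp [List.headI]

theorem fold_toList :
    ∀ (ds : List String) (t : String), (∀ d ∈ ds, d.toList ≠ []) →
      (ds.foldl (fun name delimiter => ((PySem.Str.split? name delimiter).getD []).headI) t).toList =
        (ds.map String.toList).foldl stepC t.toList := by
  intro ds
  induction ds with
  | nil => intro t _; simp
  | cons d ds ih =>
    intro t hne
    simp only [List.foldl_cons, List.map_cons]
    rw [ih _ (fun d' hd' => hne d' (by simp [hd']))]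
    rw [step_toList t d (hne d (by simp))]

-- ---- occurrence toolbox ----

theorem occursAt_take {s e : List Char} {c p : Nat} (hne : e ≠ [])
    (h : e <+: (s.take c).drop p) : e <+: s.drop p ∧ p + e.length ≤ c := by
  rw [List.drop_take] at h
  constructor
  · exact h.trans (List.take_prefix _ _)
  · have hl := h.length_le
    rw [List.length_take] at hl
    have hpos : 0 < e.length := by cases e with | nil => simp at hne | cons a t => simp
    omega

theorem occursAt_into_take {s e : List Char} {c p : Nat}
    (h1 : e <+: s.drop p) (h2 : p + e.length ≤ c) : e <+: (s.take c).drop p := by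
  rw [List.drop_take, List.prefix_take_iff]
  exact ⟨h1, by omega⟩

theorem drop_of_prefix {s d : List Char} {i k : Nat} (hd : d <+: s.drop i) (hk : k ≤ d.length) :
    d.drop k <+: s.drop (i + k) := by
  obtain ⟨t, ht⟩ := hd
  have h1 : s.drop (i + k) = (s.drop i).drop k := by rw [List.drop_drop]
  rw [h1, ← ht, List.drop_append]
  have h2 : k - d.length = 0 := by omega
  rw [h2, List.drop_zero]
  exact ⟨t, rfl⟩

theorem findTake_neg {s e : List Char} {c : Nat} (hne : e ≠ [])
    (h : ∀ p, e <+: s.drop p → ¬ (p + e.length ≤ c)) :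
    PySem.Chars.find (s.take c) e = -1 := by
  rw [PySem.Chars.find_eq_neg_one_iff]
  intro hinf
  have hin : PySem.Chars.isIn e (s.take c) = true := (PySem.Chars.isIn_iff_infix e (s.take c)).2 hinf
  obtain ⟨j, hj⟩ := (PySem.Chars.exists_prefix_drop_iff_isIn e (s.take c)).2 hin
  obtain ⟨h1, h2⟩ := occursAt_take hne hj
  exact h j h1 h2

theorem findTake_eq {s d : List Char} {c i : Nat} (hne : d ≠ [])
    (hd : d <+: s.drop i) (hmin : ∀ q < i, ¬ d <+: s.drop q) (hc : i + d.length ≤ c) :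
    PySem.Chars.find (s.take c) d = (i : Int) := by
  have hocc : d <+: (s.take c).drop i := occursAt_into_take hd hc
  have hinf : d <:+: s.take c := by
    rw [← PySem.Chars.isIn_iff_infix, ← PySem.Chars.exists_prefix_drop_iff_isIn]
    exact ⟨i, hocc⟩
  have hpos : (0 : Int) ≤ PySem.Chars.find (s.take c) d :=
    (PySem.Chars.find_nonneg_iff (s.take c) d).2 hinf
  obtain ⟨hsp, hmin'⟩ := PySem.Chars.find_spec hpos
  obtain ⟨hps, _⟩ := occursAt_take hne hsp
  have h1 : ¬ (PySem.Chars.find (s.take c) d).toNat < i := fun hlt => hmin _ hlt hps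
  have h2 : ¬ i < (PySem.Chars.find (s.take c) d).toNat := fun hlt => hmin' i hlt hocc
  omega

-- ---- fold evaluation ----

theorem fold_ge (s : List Char) (b : Nat) :
    ∀ (ds : List (List Char)) (c : Nat), b ≤ c → (∀ e ∈ ds, e ≠ []) →
      (∀ e ∈ ds, ∀ p, e <+: s.drop p → b ≤ p) →
      b ≤ ds.foldl (stepN s) c := by
  intro ds
  induction ds with
  | nil => intro c hc _ _; simpa using hc
  | cons d ds ih =>
    intro c hc hne hocc
    simp only [List.foldl_cons]
    have hstep : b ≤ stepN s c d := by
      unfold stepN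
      split_ifs with hf
      · exact hc
      · have hge := PySem.Chars.neg_one_le_find (s.take c) d
        have hpos : (0 : Int) ≤ PySem.Chars.find (s.take c) d := by omega
        obtain ⟨hsp, _⟩ := PySem.Chars.find_spec hpos
        obtain ⟨hps, _⟩ := occursAt_take (hne d (by simp)) hsp
        exact hocc d (by simp) _ hps
    exact ih (stepN s c d) hstep (fun e he => hne e (by simp [he]))
      (fun e he => hocc e (by simp [he]))

theorem fold_stay (s : List Char) (i : Nat) :
    ∀ (ds : List (List Char)), (∀ e ∈ ds, e ≠ []) →
      (∀ e ∈ ds, ∀ p, e <+: s.drop p → ¬ (p + e.length ≤ i)) →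
      ds.foldl (stepN s) i = i := by
  intro ds
  induction ds with
  | nil => intro _ _; rfl
  | cons d ds ih =>
    intro hne hocc
    simp only [List.foldl_cons]
    have hstep : stepN s i d = i := by
      unfold stepN
      rw [findTake_neg (hne d (by simp)) (hocc d (by simp))]
      simp
    rw [hstep]
    exact ih (fun e he => hne e (by simp [he])) (fun e he => hocc e (by simp [he]))

-- the master evaluation of A's fold: the list splits as pre ++ d :: post, the predecessors
-- never occur below i + |d|, d first occurs at i, the successors never fit below i
theorem foldN_eval (s : List Char) (pre post : List (List Char)) (d : List Char) (i : Nat)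
    (hnil : ∀ e ∈ pre ++ d :: post, e ≠ [])
    (hd : d <+: s.drop i)
    (hmind : ∀ q < i, ¬ d <+: s.drop q)
    (hpre : ∀ e ∈ pre, ∀ p, e <+: s.drop p → i + d.length ≤ p)
    (hpost : ∀ e ∈ post, ∀ p, e <+: s.drop p → ¬ (p + e.length ≤ i))
    (hc : i + d.length ≤ s.length) :
    (pre ++ d :: post).foldl (stepN s) s.length = i := by
  rw [List.foldl_append]
  have h1 : i + d.length ≤ pre.foldl (stepN s) s.length :=
    fold_ge s (i + d.length) pre s.length hc
      (fun e he => hnil e (by simp [he])) hpre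
  simp only [List.foldl_cons]
  set C := pre.foldl (stepN s) s.length with hC
  have h2 : stepN s C d = i := by
    unfold stepN
    rw [findTake_eq (hnil d (by simp)) hd hmind h1]
    have hni : ¬ ((i : Int) = -1) := by omega
    rw [if_neg hni]
    omega
  rw [h2]
  exact fold_stay s i post (fun e he => hnil e (by simp [he])) hpost

-- ---- bScan characterization ----

theorem hitAt_iff (s : List Char) (j : Nat) :
    hitAt s j = true ↔ ∃ d ∈ delimsC, d <+: s.drop j := by
  simp [hitAt, List.any_eq_true, List.isPrefixOf_iff_prefix]

theorem bScan_cons (c : Char) (rest : List Char) :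
    bScan (c :: rest) = if hitAt (c :: rest) 0 = true then 0 else bScan rest + 1 := by
  rw [bScan]
  congr 1

theorem bScan_le (s : List Char) : bScan s ≤ s.length := by
  induction s with
  | nil => simp [bScan]
  | cons c rest ih =>
    rw [bScan_cons]
    split_ifs <;> simp <;> omega

theorem hitAt_cons_succ (c : Char) (rest : List Char) (j : Nat) :
    hitAt (c :: rest) (j + 1) = hitAt rest j := by
  simp [hitAt, List.drop_succ_cons]

theorem bScan_min (s : List Char) : ∀ j < bScan s, hitAt s j = false := by
  induction s with
  | nil => simp [bScan]
  | cons c rest ih =>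
    rw [bScan_cons]
    split_ifs with h
    · omega
    · intro j hj
      cases j with
      | zero => simpa using h
      | succ j =>
        rw [hitAt_cons_succ]
        exact ih j (by omega)

theorem bScan_hit (s : List Char) (h : bScan s < s.length) : hitAt s (bScan s) = true := by
  induction s with
  | nil => simp [bScan] at h
  | cons c rest ih =>
    rw [bScan_cons] at h ⊢
    split_ifs with hh
    · simpa using hh
    · rw [if_neg hh] at h
      rw [hitAt_cons_succ]
      exact ih (by simp at h; omega)

theorem bScan_le_of_hit (s : List Char) (j : Nat) (h : hitAt s j = true) : bScan s ≤ j := by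
  by_contra hc
  have hf := bScan_min s j (by omega)
  rw [h] at hf
  exact absurd hf (by simp)

theorem pat_hit {s : List Char} {i : Nat} (hp : patC.isPrefixOf (s.drop i) = true) :
    hitAt s i = true := by
  refine (hitAt_iff s i).2 ⟨"SCCC".toList, by decide, ?_⟩
  exact (show ("SCCC".toList) <+: patC by decide).trans ((List.isPrefixOf_iff_prefix).1 hp)

-- an occurrence at j pins the first occurrence at or before j
theorem occ_find {s e : List Char} {j : Nat} (h : e <+: s.drop j) :
    0 ≤ PySem.Chars.find s e ∧ PySem.Chars.find s e ≤ (j : Int) := by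
  have hinf : e <:+: s := by
    rw [← PySem.Chars.isIn_iff_infix, ← PySem.Chars.exists_prefix_drop_iff_isIn]
    exact ⟨j, h⟩
  have hpos : (0 : Int) ≤ PySem.Chars.find s e := (PySem.Chars.find_nonneg_iff s e).2 hinf
  obtain ⟨_, hmin⟩ := PySem.Chars.find_spec hpos
  refine ⟨hpos, ?_⟩
  by_contra hgt
  exact hmin j (by omega) h

theorem dCond_iff (s : List Char) :
    (0 ≤ PySem.Chars.find s patC ∧ ∀ d ∈ delimsC, PySem.Chars.find s d = -1 ∨
      PySem.Chars.find s patC ≤ PySem.Chars.find s d) ↔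
    ∃ i < s.length, patC.isPrefixOf (s.drop i) = true ∧ ∀ j < i, hitAt s j = false := by
  constructor
  · rintro ⟨hpos, hall⟩
    obtain ⟨hocc, hmin⟩ := PySem.Chars.find_spec hpos
    set i := (PySem.Chars.find s patC).toNat with hi
    have hilt : i < s.length := by
      have h18 := hocc.length_le
      rw [List.length_drop] at h18
      have : 0 < patC.length := by decide
      omega
    refine ⟨i, hilt, (List.isPrefixOf_iff_prefix).2 hocc, ?_⟩
    intro j hj
    by_contra hh
    have hht : hitAt s j = true := by
      cases hx : hitAt s j
      · exact absurd hx hh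
      · rfl
    obtain ⟨d, hdm, hdp⟩ := (hitAt_iff s j).1 hht
    obtain ⟨hd0, hdle⟩ := occ_find hdp
    rcases hall d hdm with hneg | hle
    · omega
    · omega
  · rintro ⟨i, hilt, hpat, hmin⟩
    have hp : patC <+: s.drop i := (List.isPrefixOf_iff_prefix).1 hpat
    obtain ⟨hpos, hple⟩ := occ_find hp
    obtain ⟨hocc, hminf⟩ := PySem.Chars.find_spec hpos
    have hfi : (PySem.Chars.find s patC).toNat = i := by
      by_contra hne
      have hlt : (PySem.Chars.find s patC).toNat < i := by omega
      have : hitAt s (PySem.Chars.find s patC).toNat = true :=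
        pat_hit ((List.isPrefixOf_iff_prefix).2 hocc)
      rw [hmin _ hlt] at this
      exact absurd this (by simp)
    refine ⟨hpos, ?_⟩
    intro d hdm
    by_cases hneg : PySem.Chars.find s d = -1
    · exact Or.inl hneg
    · right
      have hd0 : (0 : Int) ≤ PySem.Chars.find s d := by
        have := PySem.Chars.neg_one_le_find s d
        omega
      obtain ⟨hdocc, _⟩ := PySem.Chars.find_spec hd0
      have hge : i ≤ (PySem.Chars.find s d).toNat := by
        by_contra hlt
        have hht : hitAt s (PySem.Chars.find s d).toNat = true :=
          (hitAt_iff s _).2 ⟨d, hdm, hdocc⟩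
        rw [hmin _ (by omega)] at hht
        exact absurd hht (by simp)
      omega

theorem hitAt_past (s : List Char) (j : Nat) (h : s.length ≤ j) : hitAt s j = false := by
  have hd : s.drop j = [] := List.drop_eq_nil_of_le h
  unfold hitAt
  rw [hd]
  decide

-- ---- no-delimiter-can-overlap facts, reduced to decidable checks ----

def noPfx (d e : List Char) : Bool := !(e.isPrefixOf d) && !(d.isPrefixOf e)

def blocksOK (d e : List Char) : Bool :=
  (List.range d.length).all fun k =>
    decide (k = 0) || (!(e.isPrefixOf (d.drop k)) && !((d.drop k).isPrefixOf e))

-- if d occurs at i, e never occurs before i, and e can never agree with a tail of d,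
-- then e never occurs below i + |d|
theorem hpre_of_blocks {s d e : List Char} {i : Nat}
    (hd : d <+: s.drop i) (hmin : ∀ q < i, ¬ e <+: s.drop q)
    (h0 : noPfx d e = true) (hb : blocksOK d e = true) :
    ∀ p, e <+: s.drop p → i + d.length ≤ p := by
  intro p hp
  by_contra hlt
  rcases Nat.lt_or_ge p i with h | h
  · exact hmin p h hp
  · have hpk : p = i + (p - i) := by omega
    have hklt : p - i < d.length := by omega
    have hdk : d.drop (p - i) <+: s.drop p := by
      have h2 := drop_of_prefix hd (show p - i ≤ d.length by omega)
      rwa [← hpk] at h2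
    have hcmp := List.prefix_or_prefix_of_prefix hp hdk
    rcases Nat.eq_zero_or_pos (p - i) with h0' | h0'
    · rw [h0', List.drop_zero] at hcmp
      unfold noPfx at h0
      simp only [Bool.and_eq_true, Bool.not_eq_true'] at h0
      rcases hcmp with hcc | hcc
      · rw [(List.isPrefixOf_iff_prefix).2 hcc] at h0; simp at h0
      · rw [(List.isPrefixOf_iff_prefix).2 hcc] at h0; simp at h0
    · unfold blocksOK at hb
      rw [List.all_eq_true] at hb
      have hkk := hb (p - i) (List.mem_range.2 hklt)
      simp only [Bool.or_eq_true, decide_eq_true_eq, Bool.and_eq_true, Bool.not_eq_true'] at hkk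
      rcases hkk with hz | ⟨hb1, hb2⟩
      · omega
      · rcases hcmp with hcc | hcc
        · rw [(List.isPrefixOf_iff_prefix).2 hcc] at hb1; simp at hb1
        · rw [(List.isPrefixOf_iff_prefix).2 hcc] at hb2; simp at hb2

-- successors never fit below a bound i + o with o < |e| when e never occurs below i
theorem hpost_gen {s e : List Char} {i o : Nat}
    (hmin : ∀ q < i, ¬ e <+: s.drop q) (hm : o < e.length) :
    ∀ p, e <+: s.drop p → ¬ (p + e.length ≤ i + o) := by
  intro p hp hle
  have hni : ¬ p < i := fun h => hmin p h hp
  omega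

-- assemble hpre over a whole (concrete) list of predecessors
theorem hpre_all (s d : List Char) (pre : List (List Char)) (i : Nat)
    (hd : d <+: s.drop i)
    (hmin : ∀ e ∈ pre, ∀ q < i, ¬ e <+: s.drop q)
    (hall : pre.all (fun e => noPfx d e && blocksOK d e) = true) :
    ∀ e ∈ pre, ∀ p, e <+: s.drop p → i + d.length ≤ p := by
  intro e he
  rw [List.all_eq_true] at hall
  have h := hall e he
  simp only [Bool.and_eq_true] at h
  exact hpre_of_blocks hd (hmin e he) h.1 h.2

-- assemble hpost over a whole (concrete) list of successors
theorem hpost_all (s : List Char) (post : List (List Char)) (i o : Nat)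
    (hmin : ∀ e ∈ post, ∀ q < i, ¬ e <+: s.drop q)
    (hlen : post.all (fun e => decide (o < e.length)) = true) :
    ∀ e ∈ post, ∀ p, e <+: s.drop p → ¬ (p + e.length ≤ i + o) := by
  intro e he
  rw [List.all_eq_true] at hlen
  have h := hlen e he
  simp only [decide_eq_true_eq] at h
  exact hpost_gen (hmin e he) h

-- the special 'SCCC' predecessor fact: if the pattern does NOT begin at i, then
-- 'Co. Det. Center' never occurs below i + 4
theorem hpre_scc {s : List Char} {i : Nat}
    (hd : "SCCC".toList <+: s.drop i)
    (hmin : ∀ q < i, ¬ "Co. Det. Center".toList <+: s.drop q)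
    (hnp : ¬ patC <+: s.drop i) :
    ∀ p, "Co. Det. Center".toList <+: s.drop p → i + 4 ≤ p := by
  intro p hp
  by_contra hlt
  rcases Nat.lt_or_ge p i with h | h
  · exact hmin p h hp
  · have hpk : p = i + (p - i) := by omega
    have hdk : "SCCC".toList.drop (p - i) <+: s.drop p := by
      have h2 := drop_of_prefix hd (show p - i ≤ ("SCCC".toList).length by
        simp only [show ("SCCC".toList).length = 4 from rfl]; omega)
      rwa [← hpk] at h2
    have hcmp := List.prefix_or_prefix_of_prefix hp hdk
    have hk3 : p - i = 0 ∨ p - i = 1 ∨ p - i = 2 ∨ p - i = 3 := by omega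
    rcases hk3 with hk | hk | hk | hk
    · rw [hk] at hcmp
      rcases hcmp with hcc | hcc
      · have hq := (List.isPrefixOf_iff_prefix).2 hcc; revert hq; decide
      · have hq := (List.isPrefixOf_iff_prefix).2 hcc; revert hq; decide
    · rw [hk] at hcmp
      rcases hcmp with hcc | hcc
      · have hq := (List.isPrefixOf_iff_prefix).2 hcc; revert hq; decide
      · have hq := (List.isPrefixOf_iff_prefix).2 hcc; revert hq; decide
    · rw [hk] at hcmp
      rcases hcmp with hcc | hcc
      · have hq := (List.isPrefixOf_iff_prefix).2 hcc; revert hq; decide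
      · have hq := (List.isPrefixOf_iff_prefix).2 hcc; revert hq; decide
    · -- 'Co. Det. Center' at i + 3 together with 'SCCC' at i assembles the pattern at i
      apply hnp
      obtain ⟨t, ht⟩ := hd
      have h3 : s.drop p = "SCCC".toList.drop 3 ++ t := by
        rw [hpk, hk]
        have hdd : s.drop (i + 3) = (s.drop i).drop 3 := by rw [List.drop_drop]
        rw [hdd, ← ht, List.drop_append]
        simp
      obtain ⟨u, hu⟩ := hp
      rw [h3] at hu
      have ht' : t = "o. Det. Center".toList ++ u := by
        have h4 := hu
        simp only [show ("SCCC".toList.drop 3) = ['C'] from rfl] at h4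
        simp only [show ("Co. Det. Center".toList) = 'C' :: "o. Det. Center".toList from rfl] at h4
        simpa using h4.symm
      refine ⟨u, ?_⟩
      rw [← ht, ht',
        show patC = "SCCC".toList ++ "o. Det. Center".toList from by decide,
        List.append_assoc]

-- no hit anywhere: the fold never moves
theorem fold_full (s : List Char)
    (h : ∀ j, hitAt s j = false) :
    delimsC.foldl (stepN s) s.length = s.length := by
  apply fold_stay
  · decide
  · intro e he p hp _
    have hh : hitAt s p = true := (hitAt_iff s p).2 ⟨e, he, hp⟩
    rw [h p] at hh
    exact absurd hh (by simp)

-- ---- the two value lemmas ----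

-- outside D_, A's fold lands exactly on B's scan position
theorem foldN_eq_bScan (s : List Char)
    (hnd : ¬ (∃ i < s.length, patC.isPrefixOf (s.drop i) = true ∧ ∀ j < i, hitAt s j = false)) :
    delimsC.foldl (stepN s) s.length = bScan s := by
  rcases Nat.lt_or_ge (bScan s) s.length with hlt | hge
  · set i := bScan s with hi
    have hhit := bScan_hit s hlt
    rw [hitAt_iff] at hhit
    obtain ⟨d, hdmem, hd⟩ := hhit
    have hnone : ∀ e ∈ delimsC, ∀ q < i, ¬ e <+: s.drop q := by
      intro e he q hq hp
      have hh : hitAt s q = true := (hitAt_iff s q).2 ⟨e, he, hp⟩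
      rw [bScan_min s q hq] at hh
      exact absurd hh (by simp)
    have hclen : i + d.length ≤ s.length := by
      have := hd.length_le
      rw [List.length_drop] at this
      omega
    have hcase : ∀ (pre post : List (List Char)),
        delimsC = pre ++ d :: post →
        (∀ e ∈ pre, ∀ p, e <+: s.drop p → i + d.length ≤ p) →
        post ⊆ delimsC →
        post.all (fun e => decide (0 < e.length)) = true →
        delimsC.foldl (stepN s) s.length = i := by
      intro pre post hsplit hpre hsub hplen
      rw [hsplit]
      refine foldN_eval s pre post d i ?_ hd ?_ hpre ?_ hclen
      · rw [← hsplit]; decide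
      · exact hnone d hdmem
      · exact hpost_all s post i 0 (fun e he => hnone e (hsub he)) hplen
    -- ten cases, one per delimiter matching at the scan position
    have hmem : d = "-".toList ∨ d = "Annex".toList ∨ d = "Co. Det. Center".toList ∨
        d = "Det. Center".toList ∨ d = "Det, Center".toList ∨ d = "Extension".toList ∨
        d = "Jail".toList ∨ d = "SCCC".toList ∨ d = "Work Center".toList ∨
        d = "Workhouse".toList := by
      simpa [delimsC, tnDelims] using hdmem
    rcases hmem with rfl | rfl | rfl | rfl | rfl | rfl | rfl | rfl | rfl | rfl
    · exact hcase [] _ rfl (by intro e he; simp at he) (by decide) (by decide)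
    · refine hcase ["-".toList] _ rfl ?_ (by decide) (by decide)
      have hs : ["-".toList] ⊆ delimsC := by decide
      exact hpre_all s _ _ i hd (fun e he => hnone e (hs he)) (by decide)
    · refine hcase ["-".toList, "Annex".toList] _ rfl ?_ (by decide) (by decide)
      have hs : ["-".toList, "Annex".toList] ⊆ delimsC := by decide
      exact hpre_all s _ _ i hd (fun e he => hnone e (hs he)) (by decide)
    · refine hcase ["-".toList, "Annex".toList, "Co. Det. Center".toList] _ rfl ?_
        (by decide) (by decide)
      have hs : ["-".toList, "Annex".toList, "Co. Det. Center".toList] ⊆ delimsC := by decide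
      exact hpre_all s _ _ i hd (fun e he => hnone e (hs he)) (by decide)
    · refine hcase ["-".toList, "Annex".toList, "Co. Det. Center".toList,
        "Det. Center".toList] _ rfl ?_ (by decide) (by decide)
      have hs : ["-".toList, "Annex".toList, "Co. Det. Center".toList,
        "Det. Center".toList] ⊆ delimsC := by decide
      exact hpre_all s _ _ i hd (fun e he => hnone e (hs he)) (by decide)
    · refine hcase ["-".toList, "Annex".toList, "Co. Det. Center".toList, "Det. Center".toList,
        "Det, Center".toList] _ rfl ?_ (by decide) (by decide)
      have hs : ["-".toList, "Annex".toList, "Co. Det. Center".toList, "Det. Center".toList,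
        "Det, Center".toList] ⊆ delimsC := by decide
      exact hpre_all s _ _ i hd (fun e he => hnone e (hs he)) (by decide)
    · refine hcase ["-".toList, "Annex".toList, "Co. Det. Center".toList, "Det. Center".toList,
        "Det, Center".toList, "Extension".toList] _ rfl ?_ (by decide) (by decide)
      have hs : ["-".toList, "Annex".toList, "Co. Det. Center".toList, "Det. Center".toList,
        "Det, Center".toList, "Extension".toList] ⊆ delimsC := by decide
      exact hpre_all s _ _ i hd (fun e he => hnone e (hs he)) (by decide)
    · -- d = 'SCCC': the one delimiter with a possible overlap; ¬D_ rules the pattern out at i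
      refine hcase ["-".toList, "Annex".toList, "Co. Det. Center".toList, "Det. Center".toList,
        "Det, Center".toList, "Extension".toList, "Jail".toList] _ rfl ?_ (by decide) (by decide)
      have hnp : ¬ patC <+: s.drop i := by
        intro hpat
        exact hnd ⟨i, hlt, (List.isPrefixOf_iff_prefix).2 hpat, fun j hj => bScan_min s j hj⟩
      intro e he p hp
      have hmem' : e = "-".toList ∨ e = "Annex".toList ∨ e = "Co. Det. Center".toList ∨
          e = "Det. Center".toList ∨ e = "Det, Center".toList ∨ e = "Extension".toList ∨
          e = "Jail".toList := by simpa using he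
      rcases hmem' with rfl | rfl | rfl | rfl | rfl | rfl | rfl
      · exact hpre_of_blocks hd (hnone _ (by decide)) (by decide) (by decide) p hp
      · exact hpre_of_blocks hd (hnone _ (by decide)) (by decide) (by decide) p hp
      · exact hpre_scc hd (hnone _ (by decide)) hnp p hp
      · exact hpre_of_blocks hd (hnone _ (by decide)) (by decide) (by decide) p hp
      · exact hpre_of_blocks hd (hnone _ (by decide)) (by decide) (by decide) p hp
      · exact hpre_of_blocks hd (hnone _ (by decide)) (by decide) (by decide) p hp
      · exact hpre_of_blocks hd (hnone _ (by decide)) (by decide) (by decide) p hp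
    · refine hcase ["-".toList, "Annex".toList, "Co. Det. Center".toList, "Det. Center".toList,
        "Det, Center".toList, "Extension".toList, "Jail".toList, "SCCC".toList] _ rfl ?_
        (by decide) (by decide)
      have hs : ["-".toList, "Annex".toList, "Co. Det. Center".toList, "Det. Center".toList,
        "Det, Center".toList, "Extension".toList, "Jail".toList, "SCCC".toList] ⊆ delimsC := by
        decide
      exact hpre_all s _ _ i hd (fun e he => hnone e (hs he)) (by decide)
    · refine hcase ["-".toList, "Annex".toList, "Co. Det. Center".toList, "Det. Center".toList,
        "Det, Center".toList, "Extension".toList, "Jail".toList, "SCCC".toList,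
        "Work Center".toList] _ rfl ?_ (by decide) (by decide)
      have hs : ["-".toList, "Annex".toList, "Co. Det. Center".toList, "Det. Center".toList,
        "Det, Center".toList, "Extension".toList, "Jail".toList, "SCCC".toList,
        "Work Center".toList] ⊆ delimsC := by decide
      exact hpre_all s _ _ i hd (fun e he => hnone e (hs he)) (by decide)
  · have hi : bScan s = s.length := le_antisymm (bScan_le s) hge
    have hnohit : ∀ j, hitAt s j = false := by
      intro j
      rcases Nat.lt_or_ge j s.length with h | h
      · exact bScan_min s j (by omega)
      · exact hitAt_past s j h
    rw [hi, fold_full s hnohit]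

-- inside D_, A's fold lands three characters past B's scan position
theorem foldN_D (s : List Char) (i : Nat) (hp : patC <+: s.drop i)
    (hmin : ∀ j < i, hitAt s j = false) :
    delimsC.foldl (stepN s) s.length = i + 3 := by
  have hnone : ∀ e ∈ delimsC, ∀ q < i, ¬ e <+: s.drop q := by
    intro e he q hq hpf
    have hh : hitAt s q = true := (hitAt_iff s q).2 ⟨e, he, hpf⟩
    rw [hmin q hq] at hh
    exact absurd hh (by simp)
  have hlen : 18 ≤ s.length - i := by
    have := hp.length_le
    rw [List.length_drop] at this
    simpa using this
  have hd : "Co. Det. Center".toList <+: s.drop (i + 3) := by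
    have h1 := drop_of_prefix hp (show 3 ≤ patC.length by decide)
    simpa [show patC.drop 3 = "Co. Det. Center".toList from rfl] using h1
  have hmind : ∀ q < i + 3, ¬ "Co. Det. Center".toList <+: s.drop q := by
    intro q hq hpf
    rcases Nat.lt_or_ge q i with h | h
    · exact hnone _ (by decide) q h hpf
    · have hpk : q = i + (q - i) := by omega
      have hdk : patC.drop (q - i) <+: s.drop q := by
        have h2 := drop_of_prefix hp (show q - i ≤ patC.length by
          simp only [show patC.length = 18 from rfl]; omega)
        rwa [← hpk] at h2
      have hcmp := List.prefix_or_prefix_of_prefix hpf hdk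
      have hk3 : q - i = 0 ∨ q - i = 1 ∨ q - i = 2 := by omega
      rcases hk3 with hk | hk | hk <;> rw [hk] at hcmp <;>
        rcases hcmp with hcc | hcc <;>
        · have hq2 := (List.isPrefixOf_iff_prefix).2 hcc; revert hq2; decide
  have hsplit : delimsC = ["-".toList, "Annex".toList] ++ "Co. Det. Center".toList ::
      ["Det. Center".toList, "Det, Center".toList, "Extension".toList, "Jail".toList,
       "SCCC".toList, "Work Center".toList, "Workhouse".toList] := by decide
  rw [hsplit]
  refine foldN_eval s _ _ _ (i + 3) (by decide) hd hmind ?_ ?_ (by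
    simp only [show ("Co. Det. Center".toList).length = 15 from rfl]; omega)
  · -- '-' and 'Annex' never agree with any tail of the 18-char pattern
    intro e he p hpf
    have hmem' : e = "-".toList ∨ e = "Annex".toList := by simpa using he
    have hgoal : i + patC.length ≤ p → i + 3 + ("Co. Det. Center".toList).length ≤ p := by
      simp only [show patC.length = 18 from rfl,
        show ("Co. Det. Center".toList).length = 15 from rfl]
      omega
    rcases hmem' with rfl | rfl
    · exact hgoal (hpre_of_blocks hp (hnone _ (by decide)) (by decide) (by decide) p hpf)
    · exact hgoal (hpre_of_blocks hp (hnone _ (by decide)) (by decide) (by decide) p hpf)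
  · -- every later delimiter is at least 4 long, so it cannot fit below i + 3
    have hs : ["Det. Center".toList, "Det, Center".toList, "Extension".toList, "Jail".toList,
       "SCCC".toList, "Work Center".toList, "Workhouse".toList] ⊆ delimsC := by decide
    exact hpost_all s _ i 3 (fun e he => hnone e (hs he)) (by decide)

-- inside D_, B's scan stops exactly at the pattern
theorem bScan_D (s : List Char) (i : Nat) (hp : patC <+: s.drop i)
    (hmin : ∀ j < i, hitAt s j = false) : bScan s = i := by
  have hscc : "SCCC".toList <+: s.drop i :=
    (show ("SCCC".toList) <+: patC by decide).trans hp
  have hhit : hitAt s i = true := (hitAt_iff s i).2 ⟨"SCCC".toList, by decide, hscc⟩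
  have h1 : bScan s ≤ i := bScan_le_of_hit s i hhit
  rcases Nat.lt_or_ge (bScan s) i with h | h
  · have := hmin (bScan s) h
    have hlen : 18 ≤ s.length - i := by
      have := hp.length_le
      rw [List.length_drop] at this
      simpa using this
    rw [bScan_hit s (by omega)] at this
    exact absurd this (by simp)
  · omega

-- the two ports on the toList level, outside the map
theorem portA_toList (s : String) (h : PySem.Dict.contains tnMap s = false) :
    (pretend_facility_is_county_py s).toList =
      s.toList.take ((delimsC.foldl (stepN s.toList) s.toList.length)) := by
  unfold pretend_facility_is_county_py
  rw [h]
  simp only [Bool.false_eq_true, if_false]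
  rw [fold_toList tnDelims s (by decide)]
  have h1 := fold_idx s.toList (tnDelims.map String.toList) s.toList.length (by decide) (le_refl _)
  rw [List.take_length] at h1
  have h2 := foldI_foldN s.toList (tnDelims.map String.toList) s.toList.length (le_refl _)
  rw [h1, h2.1]
  rfl

theorem portB_toList (s : String) (h : PySem.Dict.contains tnMap s = false) :
    (pretend_facility_is_county_py_alt s).toList = s.toList.take (bScan s.toList) := by
  unfold pretend_facility_is_county_py_alt
  rw [h]
  simp only [Bool.false_eq_true, if_false]
  rw [PySem.Str.toList_slice, PySem.Chars.slice_eq_listSlice, PySem.List.slice_to_natCast]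

-- ===== VERDICT (by name: the statements are the Claim_ definitions above) =====
theorem pretend_facility_is_county_py_spec : Claim_unchanged_pretend_facility_is_county_py := by
  intro s _
  intro hnd
  by_cases hc : PySem.Dict.contains tnMap s = true
  · unfold pretend_facility_is_county_py pretend_facility_is_county_py_alt
    rw [hc]
    simp only [reduceIte]
  · rw [← String.toList_inj, portA_toList s (by simpa using hc), portB_toList s (by simpa using hc)]
    rw [foldN_eq_bScan s.toList (fun hx => hnd ((dCond_iff s.toList).2 hx))]

set_option maxRecDepth 40000 in
set_option maxHeartbeats 2000000 in
theorem pretend_facility_is_county_py_changed : Claim_changed_pretend_facility_is_county_py := by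
  unfold Claim_changed_pretend_facility_is_county_py
  decide

theorem pretend_facility_is_county_py_tight : Claim_exact_pretend_facility_is_county_py := by
  intro s _ hD heq
  obtain ⟨i, hilt, hpb, hmin⟩ := (dCond_iff s.toList).1 hD
  have hp : patC <+: s.toList.drop i := (List.isPrefixOf_iff_prefix).1 hpb
  have hlen : i + 18 ≤ s.toList.length := by
    have h18 := hp.length_le
    rw [List.length_drop] at h18
    simp only [show patC.length = 18 from rfl] at h18
    omega
  by_cases hc : PySem.Dict.contains tnMap s = true
  · have hk : "Johnson City (F)" = s ∨ "Kingsport City" = s := by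
      simpa [tnMap] using hc
    rcases hk with h | h <;> subst h
    · have h16 : ("Johnson City (F)").toList.length = 16 := by decide
      omega
    · have h14 : ("Kingsport City").toList.length = 14 := by decide
      omega
  · have hA := portA_toList s (by simpa using hc)
    have hB := portB_toList s (by simpa using hc)
    rw [heq, hB] at hA
    rw [foldN_D s.toList i hp hmin, bScan_D s.toList i hp hmin] at hA
    have hlA : (s.toList.take (i + 3)).length = i + 3 := by
      rw [List.length_take]; omega
    have hlB : (s.toList.take i).length = i := by
      rw [List.length_take]; omega
    rw [← hA] at hlA
    omega
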